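-- pv_equiv track=rewrite | github.com/jadddon/odds-edge | core/event_matcher.py | extract_college_school_name
-- ===== SOURCE A (Python) =====
-- COLLEGE_MASCOTS = [
--     'wildcats', 'bulldogs', 'tigers', 'eagles', 'bears', 'lions', 'panthers',
--     'hawks', 'huskies', 'cardinals', 'knights', 'bearcats', 'buckeyes',
--     'wolverines', 'spartans', 'gophers', 'badgers', 'hawkeyes', 'cyclones',
--     'jayhawks', 'sooners', 'longhorns', 'aggies', 'razorbacks', 'rebels',
--     'volunteers', 'commodores', 'gamecocks', 'gators', 'seminoles', 'hurricanes',
--     'cavaliers', 'hokies', 'wolfpack', 'tar heels', 'blue devils', 'demon deacons',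
--     'orange', 'yellow jackets', 'fighting irish', 'trojans', 'bruins', 'ducks',
--     'beavers', 'cougars', 'utes', 'buffaloes', 'sun devils', 'golden bears',
--     'cardinal', 'mountaineers', 'red raiders', 'horned frogs', 'mustangs',
--     'owls', 'bobcats', 'roadrunners', 'miners', 'lobos', 'aztecs',
--     'falcons', 'rams', 'broncos', 'cowboys', 'cornhuskers', 'bluejays',
--     'shockers', 'pirates', 'billikens', 'musketeers', 'hoyas',
--     'friars', 'red storm', 'peacocks', 'gaels', 'toreros', 'dons', 'waves',
--     'anteaters', 'matadors', 'titans', 'highlanders', 'hornets',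
--     'braves', 'jaguars', 'golden lions', 'bison', 'midshipmen', 'black knights',
--     'scarlet knights', 'nittany lions', 'terrapins', 'hoosiers', 'boilermakers',
--     'fighting illini', 'golden flashes', 'redhawks', 'rockets', 'chippewas',
--     'bulls', 'zips', 'penguins', 'thundering herd', 'flames',
-- ]
--
-- def extract_college_school_name(vegas_name: str) -> str:
--     """Extract school name from Vegas college team name (removes mascot)."""
--     if not vegas_name:
--         return ''
--     name_lower = vegas_name.lower().strip()
--     for mascot in sorted(COLLEGE_MASCOTS, key=len, reverse=True):
--         if name_lower.endswith(' ' + mascot):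
--             name_lower = name_lower[:-len(mascot)-1].strip()
--             break
--     name_lower = name_lower.replace('st.', 'st').replace('state', 'st')
--     name_lower = name_lower.replace("'s", 's').replace("'", '')
--     return name_lower.strip()
-- ===== SOURCE B (Python) =====
-- COLLEGE_MASCOTS = [
--     'wildcats', 'bulldogs', 'tigers', 'eagles', 'bears', 'lions', 'panthers',
--     'hawks', 'huskies', 'cardinals', 'knights', 'bearcats', 'buckeyes',
--     'wolverines', 'spartans', 'gophers', 'badgers', 'hawkeyes', 'cyclones',
--     'jayhawks', 'sooners', 'longhorns', 'aggies', 'razorbacks', 'rebels',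
--     'volunteers', 'commodores', 'gamecocks', 'gators', 'seminoles', 'hurricanes',
--     'cavaliers', 'hokies', 'wolfpack', 'tar heels', 'blue devils', 'demon deacons',
--     'orange', 'yellow jackets', 'fighting irish', 'trojans', 'bruins', 'ducks',
--     'beavers', 'cougars', 'utes', 'buffaloes', 'sun devils', 'golden bears',
--     'cardinal', 'mountaineers', 'red raiders', 'horned frogs', 'mustangs',
--     'owls', 'bobcats', 'roadrunners', 'miners', 'lobos', 'aztecs',
--     'falcons', 'rams', 'broncos', 'cowboys', 'cornhuskers', 'bluejays',
--     'shockers', 'pirates', 'billikens', 'musketeers', 'hoyas',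
--     'friars', 'red storm', 'peacocks', 'gaels', 'toreros', 'dons', 'waves',
--     'anteaters', 'matadors', 'titans', 'highlanders', 'hornets',
--     'braves', 'jaguars', 'golden lions', 'bison', 'midshipmen', 'black knights',
--     'scarlet knights', 'nittany lions', 'terrapins', 'hoosiers', 'boilermakers',
--     'fighting illini', 'golden flashes', 'redhawks', 'rockets', 'chippewas',
--     'bulls', 'zips', 'penguins', 'thundering herd', 'flames',
-- ]
--
-- # Index the mascots once: a hash set of the names plus the maximum mascot length.
-- # Instead of trying every mascot as a suffix, scan the candidate cut points (the
-- # spaces in the last max-mascot-length window of the name, left to right) and cut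
-- # at the first space whose tail is a known mascot: the leftmost such space gives
-- # exactly the longest matching mascot, so this agrees with A's longest-first rule.
-- _MASCOT_SET = frozenset(COLLEGE_MASCOTS)
-- _MAX_MASCOT_LEN = max(len(m) for m in COLLEGE_MASCOTS)
--
--
-- def extract_college_school_name(vegas_name: str) -> str:
--     """Extract school name from Vegas college team name (removes mascot)."""
--     if not vegas_name:
--         return ''
--     name = vegas_name.lower().strip()
--     start = len(name) - _MAX_MASCOT_LEN - 1
--     if start < 0:
--         start = 0
--     for i in range(start, len(name)):
--         if name[i] == ' ' and name[i + 1:] in _MASCOT_SET: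
--             name = name[:i].strip()
--             break
--     name = name.replace('st.', 'st').replace('state', 'st')
--     name = name.replace("'s", 's').replace("'", '')
--     return name.strip()
-- ===== Notes on version B (the rewrite author's own statement) =====
-- stated objective: alternative
-- what changed: Instead of sorting the 104-entry mascot table per call and trying each mascot as a suffix, B indexes the mascots once into a frozenset plus their maximum length and scans the NAME's candidate cut points (the spaces in its last max-mascot-length window, left to right), cutting at the first space whose tail is in the set; the leftmost matching space yields exactly the longest matching mascot, so it equals A's longest-first rule.
import Mathlib
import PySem

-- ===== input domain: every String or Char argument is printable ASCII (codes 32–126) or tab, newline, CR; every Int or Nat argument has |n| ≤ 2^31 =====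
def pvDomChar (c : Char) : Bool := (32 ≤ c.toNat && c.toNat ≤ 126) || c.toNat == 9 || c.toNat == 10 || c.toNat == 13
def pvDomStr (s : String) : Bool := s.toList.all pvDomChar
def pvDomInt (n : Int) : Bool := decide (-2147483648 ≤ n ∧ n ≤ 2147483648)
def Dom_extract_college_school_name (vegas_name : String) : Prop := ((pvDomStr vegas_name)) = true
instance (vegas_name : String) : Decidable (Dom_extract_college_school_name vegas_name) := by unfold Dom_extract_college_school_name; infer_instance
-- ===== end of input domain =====

-- B indexes the mascots once (a set plus the maximum mascot length) and scans the candidate cut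
-- points of the NAME (spaces in its last max-length window, left to right) instead of A's
-- sort-the-table-and-try-each-suffix scan; leftmost matching space = longest matching mascot.


-- ===== PORT A =====
def pvMascots : List String := [
  "wildcats", "bulldogs", "tigers", "eagles", "bears", "lions", "panthers",
  "hawks", "huskies", "cardinals", "knights", "bearcats", "buckeyes",
  "wolverines", "spartans", "gophers", "badgers", "hawkeyes", "cyclones",
  "jayhawks", "sooners", "longhorns", "aggies", "razorbacks", "rebels",
  "volunteers", "commodores", "gamecocks", "gators", "seminoles", "hurricanes",
  "cavaliers", "hokies", "wolfpack", "tar heels", "blue devils", "demon deacons",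
  "orange", "yellow jackets", "fighting irish", "trojans", "bruins", "ducks",
  "beavers", "cougars", "utes", "buffaloes", "sun devils", "golden bears",
  "cardinal", "mountaineers", "red raiders", "horned frogs", "mustangs",
  "owls", "bobcats", "roadrunners", "miners", "lobos", "aztecs",
  "falcons", "rams", "broncos", "cowboys", "cornhuskers", "bluejays",
  "shockers", "pirates", "billikens", "musketeers", "hoyas",
  "friars", "red storm", "peacocks", "gaels", "toreros", "dons", "waves",
  "anteaters", "matadors", "titans", "highlanders", "hornets",
  "braves", "jaguars", "golden lions", "bison", "midshipmen", "black knights",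
  "scarlet knights", "nittany lions", "terrapins", "hoosiers", "boilermakers",
  "fighting illini", "golden flashes", "redhawks", "rockets", "chippewas",
  "bulls", "zips", "penguins", "thundering herd", "flames"]

-- A's for-loop with break: first mascot (in the given order) whose ' '+mascot is a suffix wins.
def pvLoopA : List String → List Char → List Char
  | [], name => name
  | mascot :: rest, name =>
    if PySem.Chars.endswith name (' ' :: mascot.toList) then
      PySem.Chars.strip (PySem.List.slice name none (some (-(PySem.Str.len mascot) - 1)))
    else pvLoopA rest name

def extract_college_school_name (vegas_name : String) : String :=
  if vegas_name.toList = [] then ""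
  else
    let n0 := PySem.Chars.strip (PySem.Chars.lower vegas_name.toList)
    let n1 := pvLoopA (PySem.List.sorted pvMascots PySem.Str.len true) n0
    let n2 := PySem.Chars.replace (PySem.Chars.replace n1 "st.".toList "st".toList) "state".toList "st".toList
    let n3 := PySem.Chars.replace (PySem.Chars.replace n2 "'s".toList "s".toList) "'".toList "".toList
    String.ofList (PySem.Chars.strip n3)

-- ===== PORT B =====
-- module-level index: the mascot set and the maximum mascot length
def pvMascotSet : PySem.Set String := PySem.Set.ofList pvMascots
def pvMaxMascotLen : Int := ((PySem.List.max? (pvMascots.map PySem.Str.len) (fun x => x)).getD 0)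

-- Source B's `for i in range(start, len(name))` with early return: scan cut points left to right
def pvScanB (n : List Char) (i : Nat) : List Char :=
  if h : i < n.length then
    if n[i] == ' ' && PySem.Set.contains pvMascotSet (String.ofList (PySem.List.slice n (some ((i : Int) + 1)) none)) then
      PySem.Chars.strip (PySem.List.slice n none (some (i : Int)))
    else pvScanB n (i + 1)
  else n
termination_by n.length - i

def extract_college_school_name_alt (vegas_name : String) : String :=
  if vegas_name.toList = [] then ""
  else
    let n0 := PySem.Chars.strip (PySem.Chars.lower vegas_name.toList)
    let start : Int := (n0.length : Int) - pvMaxMascotLen - 1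
    let start : Int := if start < 0 then 0 else start
    let n1 := pvScanB n0 start.toNat
    let n2 := PySem.Chars.replace (PySem.Chars.replace n1 "st.".toList "st".toList) "state".toList "st".toList
    let n3 := PySem.Chars.replace (PySem.Chars.replace n2 "'s".toList "s".toList) "'".toList "".toList
    String.ofList (PySem.Chars.strip n3)

-- ===== PRECONDITION & SPEC =====
def Spec_extract_college_school_name (vegas_name : String) (out : String) : Prop := out = extract_college_school_name_alt vegas_name
instance (vegas_name : String) (out : String) : Decidable (Spec_extract_college_school_name vegas_name out) := by unfold Spec_extract_college_school_name; infer_instance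

-- ===== CLAIM (what is proved, stated in full; the proofs are below) =====
def Claim_equal_extract_college_school_name : Prop := ∀ (vegas_name : String), Dom_extract_college_school_name vegas_name → Spec_extract_college_school_name vegas_name (extract_college_school_name vegas_name)

-- ===== LEMMAS AND PROOFS =====

-- A's loop-with-break is "transform at the first match, else identity".
theorem pvLoopA_eq (l : List String) (n : List Char) :
    pvLoopA l n = match l.find? (fun m => PySem.Chars.endswith n (' ' :: m.toList)) with
      | some m => PySem.Chars.strip (PySem.List.slice n none (some (-(PySem.Str.len m) - 1)))
      | none => n := by
  induction l with
  | nil => rfl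
  | cons m rest ih =>
    by_cases h : PySem.Chars.endswith n (' ' :: m.toList) = true
    · simp [pvLoopA, h]
    · simp only [Bool.not_eq_true] at h
      simp [pvLoopA, h, ih]

-- Two mascots that both match as ' '+mascot suffixes of the same string and have equal length are equal.
theorem pvSuffix_unique (n : List Char) (a b : String)
    (ha : PySem.Chars.endswith n (' ' :: a.toList) = true)
    (hb : PySem.Chars.endswith n (' ' :: b.toList) = true)
    (hl : a.toList.length = b.toList.length) : a = b := by
  rw [PySem.Chars.endswith_iff] at ha hb
  have hlen : (' ' :: a.toList).length = (' ' :: b.toList).length := by simp [hl]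
  have hs : (' ' :: a.toList) <:+ (' ' :: b.toList) :=
    List.suffix_of_suffix_length_le ha hb (le_of_eq hlen)
  have := hs.eq_of_length hlen
  exact String.toList_inj.mp (by injection this)

-- Core A-side characterisation: first match in the length-descending sorted order = longest match.
theorem pvSelect (n : List Char) :
    (PySem.List.sorted pvMascots PySem.Str.len true).find? (fun m => PySem.Chars.endswith n (' ' :: m.toList))
      = PySem.List.max? (pvMascots.filter (fun m => PySem.Chars.endswith n (' ' :: m.toList))) PySem.Str.len := by
  set P : String → Bool := fun m => PySem.Chars.endswith n (' ' :: m.toList) with hP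
  have hperm := PySem.List.sorted_perm pvMascots PySem.Str.len true
  have hpair := PySem.List.sorted_pairwise_rev pvMascots PySem.Str.len
  cases hf : (PySem.List.sorted pvMascots PySem.Str.len true).find? P with
  | none =>
    have hnone := List.find?_eq_none.mp hf
    have : pvMascots.filter P = [] := by
      rw [List.filter_eq_nil_iff]
      intro m hm
      exact hnone m (hperm.mem_iff.mpr hm)
    rw [this]
    rfl
  | some a =>
    obtain ⟨hPa, as, bs, heq, hprev⟩ := List.find?_eq_some_iff_append.mp hf
    have hamem : a ∈ pvMascots := hperm.mem_iff.mp (by rw [heq]; simp)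
    have hafilter : a ∈ pvMascots.filter P := List.mem_filter.mpr ⟨hamem, hPa⟩
    have hmax : ∀ m ∈ pvMascots, P m = true → PySem.Str.len m ≤ PySem.Str.len a := by
      intro m hm hPm
      have hm' : m ∈ PySem.List.sorted pvMascots PySem.Str.len true := hperm.mem_iff.mpr hm
      rw [heq] at hm' hpair
      rcases List.mem_append.mp hm' with h1 | h2
      · exact absurd hPm (by simpa using hprev m h1)
      · rcases List.mem_cons.mp h2 with rfl | h3
        · exact le_refl _
        · exact (List.pairwise_cons.mp (List.pairwise_append.mp hpair).2.1).1 m h3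
    cases hg : PySem.List.max? (pvMascots.filter P) PySem.Str.len with
    | none =>
      rw [PySem.List.max?_eq_none_iff] at hg
      rw [hg] at hafilter
      exact absurd hafilter (List.not_mem_nil)
    | some b =>
      have hbfilter := PySem.List.max?_mem hg
      obtain ⟨hbmem, hPb⟩ := List.mem_filter.mp hbfilter
      have h1 : PySem.Str.len b ≤ PySem.Str.len a := hmax b hbmem hPb
      have h2 : PySem.Str.len a ≤ PySem.Str.len b := PySem.List.max?_isMax hg a hafilter
      have hlenInt : PySem.Str.len a = PySem.Str.len b := le_antisymm h2 h1
      have hlen : a.toList.length = b.toList.length := by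
        have : ((a.toList.length : Int)) = ((b.toList.length : Int)) := by
          simpa [pysem] using hlenInt
        exact_mod_cast this
      have : a = b := pvSuffix_unique n a b hPa hPb hlen
      rw [this]

-- B's scan condition at index j, in list form
theorem pvScanB_cond (n : List Char) (j : Nat) (h : j < n.length) :
    ((n[j] == ' ' && PySem.Set.contains pvMascotSet (String.ofList (PySem.List.slice n (some ((j : Int) + 1)) none))) = true)
      ↔ (n[j] = ' ' ∧ String.ofList (n.drop (j + 1)) ∈ pvMascots) := by
  have hs : PySem.List.slice n (some ((j : Int) + 1)) none = n.drop (j + 1) := by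
    have : ((j : Int) + 1) = ((j + 1 : Nat) : Int) := by push_cast; ring
    rw [this, PySem.List.slice_from_natCast]
  rw [hs]
  simp [pvMascotSet, PySem.Set.mem_ofList]

-- a scan hit at index j is exactly a space-prefixed mascot suffix of the right length
theorem pvHit_iff (n : List Char) (j : Nat) (hj : j < n.length) :
    (n[j] = ' ' ∧ String.ofList (n.drop (j + 1)) ∈ pvMascots)
      ↔ ∃ m ∈ pvMascots, PySem.Chars.endswith n (' ' :: m.toList) = true ∧ j + m.toList.length + 1 = n.length := by
  constructor
  · rintro ⟨hsp, hmem⟩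
    refine ⟨String.ofList (n.drop (j + 1)), hmem, ?_, ?_⟩
    · rw [PySem.Chars.endswith_iff, String.toList_ofList]
      have hd : n.drop j = ' ' :: n.drop (j + 1) := by
        rw [List.drop_eq_getElem_cons hj, hsp]
      rw [← hd]
      exact List.drop_suffix j n
    · rw [String.toList_ofList, List.length_drop]
      omega
  · rintro ⟨m, hmem, hend, hlen⟩
    rw [PySem.Chars.endswith_iff] at hend
    obtain ⟨pre, hpre⟩ := hend
    have hprelen : pre.length = j := by
      have := congrArg List.length hpre
      simp only [List.length_append, List.length_cons] at this
      omega
    have hdropj : n.drop j = ' ' :: m.toList := by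
      rw [← hpre, ← hprelen, List.drop_left]
    have hd := List.drop_eq_getElem_cons hj (l := n)
    rw [hdropj] at hd
    injection hd with h1 h2
    exact ⟨h1.symm, by rw [← h2, String.ofList_toList]; exact hmem⟩

-- if no position from i on hits, the scan returns the name unchanged
theorem pvScanB_none (n : List Char) : ∀ (k i : Nat), n.length - i ≤ k →
    (∀ j (hj : j < n.length), i ≤ j → ¬(n[j] = ' ' ∧ String.ofList (n.drop (j + 1)) ∈ pvMascots)) →
    pvScanB n i = n := by
  intro k
  induction k with
  | zero =>
    intro i hk _
    unfold pvScanB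
    rw [dif_neg (by omega)]
  | succ k ih =>
    intro i hk hnone
    unfold pvScanB
    by_cases h : i < n.length
    · rw [dif_pos h, if_neg, ih (i + 1) (by omega) (fun j hj hij => hnone j hj (by omega))]
      intro hc
      exact hnone i h (le_refl i) ((pvScanB_cond n i h).mp hc)
    · rw [dif_neg h]

-- if position k is the first hit at or after i, the scan cuts exactly there
theorem pvScanB_hit (n : List Char) (k : Nat) (hk : k < n.length)
    (hhit : n[k] = ' ' ∧ String.ofList (n.drop (k + 1)) ∈ pvMascots) :
    ∀ (d i : Nat), k - i ≤ d → i ≤ k →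
    (∀ j (hj : j < n.length), i ≤ j → j < k → ¬(n[j] = ' ' ∧ String.ofList (n.drop (j + 1)) ∈ pvMascots)) →
    pvScanB n i = PySem.Chars.strip (n.take k) := by
  intro d
  induction d with
  | zero =>
    intro i hd hik _
    have : i = k := by omega
    subst this
    unfold pvScanB
    rw [dif_pos hk, if_pos ((pvScanB_cond n i hk).mpr hhit), PySem.List.slice_to_natCast]
  | succ d ih =>
    intro i hd hik hnone
    by_cases hik' : i = k
    · subst hik'
      unfold pvScanB
      rw [dif_pos hk, if_pos ((pvScanB_cond n i hk).mpr hhit), PySem.List.slice_to_natCast]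
    · unfold pvScanB
      rw [dif_pos (by omega), if_neg, ih (i + 1) (by omega) (by omega)
        (fun j hj hij hjk => hnone j hj (by omega) hjk)]
      intro hc
      exact hnone i (by omega) (le_refl i) (by omega) ((pvScanB_cond n i (by omega)).mp hc)

-- every mascot is at most 15 characters long
set_option maxRecDepth 8192 in
theorem pvMascotLen_le : ∀ m ∈ pvMascots, m.toList.length ≤ 15 := by decide

set_option maxRecDepth 8192 in
theorem pvMaxLen_eq : pvMaxMascotLen = 15 := by decide

-- the two mascot-stripping passes agree on every name
theorem pvStrip_eq (n : List Char) :
    pvLoopA (PySem.List.sorted pvMascots PySem.Str.len true) n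
      = pvScanB n (if (n.length : Int) - pvMaxMascotLen - 1 < 0 then 0 else (n.length : Int) - pvMaxMascotLen - 1).toNat := by
  set s0 : Nat := (if (n.length : Int) - pvMaxMascotLen - 1 < 0 then 0 else (n.length : Int) - pvMaxMascotLen - 1).toNat with hs0
  have hs0' : s0 = n.length - 16 := by
    rw [hs0, pvMaxLen_eq]
    split <;> omega
  rw [pvLoopA_eq, pvSelect]
  set P : String → Bool := fun m => PySem.Chars.endswith n (' ' :: m.toList) with hP
  cases hg : PySem.List.max? (pvMascots.filter P) PySem.Str.len with
  | none =>
    rw [PySem.List.max?_eq_none_iff] at hg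
    refine (pvScanB_none n n.length s0 (by omega) ?_).symm
    intro j hj _ hc
    obtain ⟨m, hmem, hend, -⟩ := (pvHit_iff n j hj).mp hc
    have : m ∈ pvMascots.filter P := List.mem_filter.mpr ⟨hmem, hend⟩
    rw [hg] at this
    exact absurd this (List.not_mem_nil)
  | some m =>
    have hmfilter := PySem.List.max?_mem hg
    obtain ⟨hmmem, hPm⟩ := List.mem_filter.mp hmfilter
    have hmax : ∀ m' ∈ pvMascots, P m' = true → PySem.Str.len m' ≤ PySem.Str.len m :=
      fun m' hm' hPm' => PySem.List.max?_isMax hg m' (List.mem_filter.mpr ⟨hm', hPm'⟩)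
    -- decompose n around the matched mascot
    have hend := hPm
    rw [hP] at hend
    simp only at hend
    rw [PySem.Chars.endswith_iff] at hend
    obtain ⟨pre, hpre⟩ := hend
    set L : Nat := m.toList.length with hL
    have hnlen : n.length = pre.length + L + 1 := by
      have := congrArg List.length hpre
      simp only [List.length_append, List.length_cons] at this
      omega
    set k : Nat := pre.length with hkdef
    have hkn : k < n.length := by omega
    have hdropk : n.drop k = ' ' :: m.toList := by
      rw [← hpre, hkdef, List.drop_left]
    have hd := List.drop_eq_getElem_cons hkn (l := n)
    rw [hdropk] at hd
    have hhit : n[k] = ' ' ∧ String.ofList (n.drop (k + 1)) ∈ pvMascots := by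
      injection hd with h1 h2
      exact ⟨h1.symm, by rw [← h2, String.ofList_toList]; exact hmmem⟩
    -- lengths via Str.len
    have hlenm : PySem.Str.len m = (L : Int) := by simp [pysem, hL]
    -- left side: the negative slice is take k
    have hsliceA : PySem.List.slice n none (some (-(PySem.Str.len m) - 1)) = n.take k := by
      have h1 : -(PySem.Str.len m) - 1 = -((L + 1 : Nat) : Int) := by rw [hlenm]; push_cast; ring
      rw [h1, PySem.List.slice_to_neg_natCast n (L + 1) (by omega)]
      congr 1
      omega
    show PySem.Chars.strip (PySem.List.slice n none (some (-(PySem.Str.len m) - 1))) = pvScanB n s0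
    rw [hsliceA]
    -- right side: scan cuts at k
    refine (pvScanB_hit n k hkn hhit (k - s0) s0 (le_refl _) (by
        have := pvMascotLen_le m hmmem
        omega) ?_).symm
    intro j hj hs0j hjk hc
    obtain ⟨m', hmem', hend', hlen'⟩ := (pvHit_iff n j hj).mp hc
    have hle : PySem.Str.len m' ≤ PySem.Str.len m := hmax m' hmem' hend'
    rw [hlenm] at hle
    have : (m'.toList.length : Int) ≤ (L : Int) := by
      have h2 : PySem.Str.len m' = (m'.toList.length : Int) := by simp [pysem]
      omega
    have : m'.toList.length ≤ L := by exact_mod_cast this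
    omega

-- ===== VERDICT (by name: the statement is the Claim_ definition above) =====
theorem extract_college_school_name_spec : Claim_equal_extract_college_school_name := by
  intro v _
  unfold Spec_extract_college_school_name extract_college_school_name extract_college_school_name_alt
  by_cases h : v.toList = []
  · simp [h]
  · simp only [h, if_false]
    rw [pvStrip_eq]
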